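-- pv_equiv track=rewrite | github.com/Mopsephu/WordsExtractor | wordsextractor.py | countAmountOfWordsInText
-- ===== SOURCE A (Python) =====
-- def countAmountOfWordsInText(text : str) -> int:
--     amount : int = 0;
--     isInWord : bool = False;
--     for i in text:
--         if i == " ":
--             if isInWord:
--                 isInWord = False;
--         else:
--             if not isInWord:
--                 isInWord = True;
--                 amount+=1;
--     return amount;
-- ===== SOURCE B (Python) =====
-- def countAmountOfWordsInText(text : str) -> int:
--     return sum(1 for prev, cur in zip(" " + text, text) if prev == " " and cur != " ")
-- ===== Notes on version B (the rewrite author's own statement) =====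
-- stated objective: idiomatic
-- what changed: Replaced A's mutable in/out-of-word state machine by a stateless one-liner that zips the text with itself shifted by one and counts space-to-non-space boundaries.
import Mathlib
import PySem

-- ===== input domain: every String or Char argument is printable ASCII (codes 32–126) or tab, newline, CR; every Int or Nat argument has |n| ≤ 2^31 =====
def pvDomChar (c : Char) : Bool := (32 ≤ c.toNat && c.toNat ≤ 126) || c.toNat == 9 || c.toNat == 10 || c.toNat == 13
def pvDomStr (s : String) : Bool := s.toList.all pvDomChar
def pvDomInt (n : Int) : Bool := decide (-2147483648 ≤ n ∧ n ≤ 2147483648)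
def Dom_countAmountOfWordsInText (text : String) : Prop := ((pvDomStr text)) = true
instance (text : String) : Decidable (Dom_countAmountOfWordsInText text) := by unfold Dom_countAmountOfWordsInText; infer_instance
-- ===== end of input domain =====

-- B replaces A's mutable state machine with a stateless boundary count (idiomatic one-liner); same O(n) cost.

-- ===== PORT A =====
-- A: scan chars, keep (amount, isInWord); bump amount on entering a word.
def countAmountOfWordsInText (text : String) : Int :=
  (text.toList.foldl
    (fun (st : Int × Bool) (i : Char) =>
      if i == ' ' then
        (if st.2 then (st.1, false) else st)
      else
        (if !st.2 then (st.1 + 1, true) else st))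
    (0, false)).1

-- ===== PORT B =====
-- B: zip " " + text with text, count pairs (space, non-space) = word starts.
def countAmountOfWordsInText_alt (text : String) : Int :=
  (((' ' :: text.toList).zip text.toList).filter
    (fun p => p.1 == ' ' && p.2 != ' ')).length

-- ===== PRECONDITION & SPEC =====
def Spec_countAmountOfWordsInText (text : String) (out : Int) : Prop := out = countAmountOfWordsInText_alt text
instance (text : String) (out : Int) : Decidable (Spec_countAmountOfWordsInText text out) := by unfold Spec_countAmountOfWordsInText; infer_instance

-- ===== CLAIM (what is proved, stated in full; the proofs are below) =====
def Claim_equal_countAmountOfWordsInText : Prop := ∀ (text : String), Dom_countAmountOfWordsInText text → Spec_countAmountOfWordsInText text (countAmountOfWordsInText text)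

-- ===== LEMMAS AND PROOFS =====

-- Loop invariant: with previous char p (isInWord = (p != ' ')) and accumulator a,
-- A's fold counts exactly the boundary pairs of B's zip.
theorem pvKey (cs : List Char) : ∀ (p : Char) (a : Int),
    (cs.foldl
      (fun (st : Int × Bool) (i : Char) =>
        if i == ' ' then
          (if st.2 then (st.1, false) else st)
        else
          (if !st.2 then (st.1 + 1, true) else st))
      (a, p != ' ')).1
    = a + (((p :: cs).zip cs).filter (fun q => q.1 == ' ' && q.2 != ' ')).length := by
  induction cs with
  | nil => intro p a; simp
  | cons c cs ih =>
    intro p a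
    rw [List.foldl_cons]
    by_cases hc : c = ' ' <;> by_cases hp : p = ' '
    · simpa [hc, hp] using ih c a
    · have hb : (p != ' ') = true := by simp [hp]
      rw [hb]; simpa [hc, hp] using ih c a
    · have hb : (c != ' ') = true := by simp [hc]
      have h := ih c (a + 1); rw [hb] at h
      simp [hc, hp] at h ⊢
      linarith
    · have hb : (p != ' ') = true := by simp [hp]
      have hb' : (c != ' ') = true := by simp [hc]
      have h := ih c a; rw [hb'] at h
      rw [hb]; simpa [hc, hp] using h

-- ===== VERDICT (by name: the statement is the Claim_ definition above) =====
theorem countAmountOfWordsInText_spec : Claim_equal_countAmountOfWordsInText := by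
  intro text _
  unfold Spec_countAmountOfWordsInText countAmountOfWordsInText countAmountOfWordsInText_alt
  have h := pvKey text.toList ' ' 0
  simpa using h
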